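-- pv_equiv track=rewrite | github.com/KevinTsai18/Programacion-1 | tp3/tp3 ej2 a.py | funcion2a
-- ===== SOURCE A (Python) =====
-- def funcion2a(cant=4):
--     n=cant
--     matriz=[]
--     i=0
--     for f in range(n):
--         matriz.append([])
--         for c in range(n):
--             if f==c:
--                 matriz[f].append(1+i)
--                 i=i+2
--             else:
--                 matriz[f].append(0)
--     return matriz
-- ===== SOURCE B (Python) =====
-- def funcion2a(cant=4):
--     matriz = []
--     for f in range(cant):
--         fila = [0] * cant
--         fila[f] = 2 * f + 1
--         matriz.append(fila)
--     return matriz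
-- ===== Notes on version B (the rewrite author's own statement) =====
-- stated objective: simpler
-- what changed: Drops the inner column loop and the running odd-number accumulator i: each row is built as [0]*n with the diagonal entry assigned directly by the closed form 2*f+1.
import Mathlib
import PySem

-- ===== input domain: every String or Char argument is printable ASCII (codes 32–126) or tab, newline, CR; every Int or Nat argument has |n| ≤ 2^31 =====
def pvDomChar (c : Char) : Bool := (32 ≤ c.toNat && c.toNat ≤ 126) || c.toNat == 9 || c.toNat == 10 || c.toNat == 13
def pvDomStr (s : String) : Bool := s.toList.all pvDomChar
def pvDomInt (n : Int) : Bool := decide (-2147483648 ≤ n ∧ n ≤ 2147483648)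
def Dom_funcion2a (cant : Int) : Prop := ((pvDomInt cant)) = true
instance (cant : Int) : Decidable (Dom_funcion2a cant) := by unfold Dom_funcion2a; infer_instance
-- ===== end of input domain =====

-- B replaces the inner column loop and the running odd accumulator i by a direct
-- row construction: a row of zeros with the diagonal set to the closed form 2*f+1.

-- ===== PORT A =====
-- inner loop body of A: for c in range(n): if f==c: matriz[f].append(1+i); i=i+2 else matriz[f].append(0)
def funcion2aInner (f : Int) (st : List (List Int) × Int) (c : Int) : List (List Int) × Int :=
  if f == c then (st.1.modify f.toNat (fun row => row ++ [1 + st.2]), st.2 + 2)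
  else (st.1.modify f.toNat (fun row => row ++ [0]), st.2)

def funcion2a (cant : Int) : List (List Int) :=
  let n := cant
  let st :=
    (PySem.List.pyRange 0 n 1).foldl
      (fun (st : List (List Int) × Int) f =>
        (PySem.List.pyRange 0 n 1).foldl (funcion2aInner f) (st.1 ++ [[]], st.2))
      ([], 0)
  st.1

-- ===== PORT B =====
def funcion2a_alt (cant : Int) : List (List Int) :=
  (PySem.List.pyRange 0 cant 1).foldl
    (fun matriz f =>
      let fila := List.replicate cant.toNat 0
      matriz ++ [fila.set f.toNat (2 * f + 1)])
    []

-- ===== PRECONDITION & SPEC =====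
def Spec_funcion2a (cant : Int) (out : List (List Int)) : Prop := out = funcion2a_alt cant
instance (cant : Int) (out : List (List Int)) : Decidable (Spec_funcion2a cant out) := by unfold Spec_funcion2a; infer_instance

-- ===== CLAIM (what is proved, stated in full; the proofs are below) =====
def Claim_equal_funcion2a : Prop := ∀ (cant : Int), Dom_funcion2a cant → Spec_funcion2a cant (funcion2a cant)

-- ===== LEMMAS AND PROOFS =====

-- modifying the last row of m ++ [r] only touches r
theorem modify_append_last (m : List (List Int)) (r : List Int) (g : List Int → List Int) :
    (m ++ [r]).modify m.length g = m ++ [g r] := by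
  induction m with
  | nil => simp [List.modify_zero_cons]
  | cons a t ih => simp [List.modify_succ_cons, ih]

-- inner iterations where c ≠ f append a zero each, leaving i unchanged
theorem inner_noHit (f : Int) (cs : List Int) (m : List (List Int)) (r : List Int) (i : Int)
    (hf : f.toNat = m.length) (h : ∀ c ∈ cs, f ≠ c) :
    cs.foldl (funcion2aInner f) (m ++ [r], i) = (m ++ [r ++ List.replicate cs.length 0], i) := by
  induction cs generalizing r with
  | nil => simp
  | cons c t ih =>
    have hne : (f == c) = false := by
      simp only [beq_eq_false_iff_ne]; exact h c (List.mem_cons_self ..)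
    simp only [List.foldl_cons, funcion2aInner, hne, Bool.false_eq_true, if_false]
    rw [hf, modify_append_last, ih (r ++ [0]) (fun c hc => h c (List.mem_cons_of_mem _ hc))]
    simp [List.replicate_succ]

-- the full inner loop for row f: builds replicate f 0 ++ [1+i] ++ zeros and bumps i by 2
theorem inner_loop (n f : Int) (m : List (List Int)) (i : Int)
    (hf : (m.length : Int) = f) (hfn : f < n) :
    (PySem.List.pyRange 0 n 1).foldl (funcion2aInner f) (m ++ [[]], i)
      = (m ++ [List.replicate f.toNat 0 ++ [1 + i] ++ List.replicate (n - f - 1).toNat 0], i + 2) := by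
  have hf0 : 0 ≤ f := by omega
  have hfT : f.toNat = m.length := by omega
  rw [PySem.List.pyRange_one_append 0 f n hf0 (le_of_lt hfn),
      PySem.List.pyRange_one_cons hfn, List.foldl_append]
  have h1 : ∀ c ∈ PySem.List.pyRange 0 f 1, f ≠ c := by
    intro c hc; rw [PySem.List.mem_pyRange_one] at hc; omega
  rw [inner_noHit f _ m [] i hfT h1]
  simp only [List.foldl_cons, funcion2aInner, beq_self_eq_true, if_true, hfT,
    modify_append_last]
  have h2 : ∀ c ∈ PySem.List.pyRange (f+1) n 1, f ≠ c := by
    intro c hc; rw [PySem.List.mem_pyRange_one] at hc; omega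
  rw [inner_noHit f _ m _ (i + 2) hfT h2]
  simp only [PySem.List.length_pyRange_one]
  have e1 : (n - (f + 1)).toNat = (n - f - 1).toNat := by omega
  simp [hfT, e1]

-- B's row equals A's row shape
theorem set_replicate (n j : Nat) (v : Int) (h : j < n) :
    (List.replicate n (0:Int)).set j v
      = List.replicate j 0 ++ [v] ++ List.replicate (n - j - 1) 0 := by
  induction j generalizing n with
  | zero =>
    cases n with
    | zero => omega
    | succ k => simp [List.replicate_succ]
  | succ j ih =>
    cases n with
    | zero => omega
    | succ k =>
      simp only [List.replicate_succ, List.set_cons_succ, ih k (by omega)]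
      simp

-- one row appended per iteration
theorem foldl_append_one_length (xs : List Int) (g : Int → List Int) (acc : List (List Int)) :
    (xs.foldl (fun m f => m ++ [g f]) acc).length = acc.length + xs.length := by
  induction xs generalizing acc with
  | nil => simp
  | cons x t ih => rw [List.foldl_cons, ih]; simp [List.length_append]; omega

-- outer invariant: after the first k rows, A's state is (B's first k rows, 2*k)
theorem outer_loop (n : Int) (k : Nat) (hk : (k : Int) ≤ n) :
    (PySem.List.pyRange 0 k 1).foldl
      (fun (st : List (List Int) × Int) f =>
        (PySem.List.pyRange 0 n 1).foldl (funcion2aInner f) (st.1 ++ [[]], st.2))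
      ([], 0)
    = ((PySem.List.pyRange 0 k 1).foldl
        (fun matriz f =>
          matriz ++ [(List.replicate n.toNat 0).set f.toNat (2 * f + 1)]) [],
       2 * (k : Int)) := by
  induction k with
  | zero => simp
  | succ k ih =>
    have hk' : (k : Int) ≤ n := by push_cast at hk; omega
    have hcast : ((k + 1 : Nat) : Int) = (k : Int) + 1 := by push_cast; ring
    rw [hcast, PySem.List.pyRange_one_succ_right (by positivity), List.foldl_append,
        List.foldl_append, ih hk']
    simp only [List.foldl_cons, List.foldl_nil]
    have hlen : (((PySem.List.pyRange 0 (k:Int) 1).foldl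
        (fun matriz f =>
          matriz ++ [(List.replicate n.toNat 0).set f.toNat (2 * f + 1)]) []).length : Int)
        = (k : Int) := by
      rw [foldl_append_one_length]
      simp [PySem.List.length_pyRange_one]
    rw [inner_loop n k _ _ hlen (by omega)]
    simp only [Int.toNat_natCast]
    rw [set_replicate n.toNat k (2 * (k:Int) + 1) (by omega)]
    have e3 : (n - (k:Int) - 1).toNat = n.toNat - k - 1 := by omega
    have e4 : 1 + 2 * (k:Int) = 2 * (k:Int) + 1 := by ring
    rw [e3, e4, Prod.mk.injEq]
    exact ⟨rfl, by ring⟩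

-- ===== VERDICT (by name: the statement is the Claim_ definition above) =====
theorem funcion2a_spec : Claim_equal_funcion2a := by
  intro cant _
  simp only [Spec_funcion2a, funcion2a, funcion2a_alt]
  by_cases h : cant ≤ 0
  · simp [PySem.List.pyRange_one_eq_nil h]
  · have hc : cant = ((cant.toNat : Nat) : Int) := by omega
    rw [hc, outer_loop ((cant.toNat : Nat) : Int) cant.toNat le_rfl]
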